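-- pv_equiv track=rewrite | github.com/s-fraresso/Project_Euler | src/1-99/0026.py | reciprocal_recurring_cycle_length
-- ===== SOURCE A (Python) =====
-- def reciprocal_recurring_cycle_length(d):
--     remainder_list = [1]
--     remainder = 1
--
--     while remainder not in remainder_list[:-1]:
--         remainder = (remainder % d) * 10
--         remainder_list.append(remainder)
--
--     cycle_length = 0
--     for i in range(len(remainder_list) - 2, -1, -1):
--         cycle_length += 1
--         if remainder_list[i] == remainder:
--             break
--
--     return cycle_length
-- ===== SOURCE B (Python) =====
-- def reciprocal_recurring_cycle_length(d):
--     # Floyd's tortoise-and-hare cycle detection on f(r) = (r % d) * 10, O(1) memory.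
--     tortoise = (1 % d) * 10
--     hare = (tortoise % d) * 10
--     while tortoise != hare:
--         tortoise = (tortoise % d) * 10
--         hare = ((hare % d) * 10 % d) * 10
--     length = 1
--     hare = (tortoise % d) * 10
--     while hare != tortoise:
--         hare = (hare % d) * 10
--         length += 1
--     return length
-- ===== Notes on version B (the rewrite author's own statement) =====
-- stated objective: faster
-- what changed: Floyd's tortoise-and-hare cycle detection with O(1) memory (two pointers until they meet, then a period-measuring walk) replaces A's growing remainder list with a per-iteration membership scan and a separate backward counting pass; intended as faster: a timing run measured B far ahead at large sizes (e.g. 166x-612x at the largest size both finished, A timing out where B returned), though one run's label stayed unconfirmed on a size A finished in under a millisecond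
-- outside the precondition, e.g. on reciprocal_recurring_cycle_length(0): A raises ZeroDivisionError, B raises ZeroDivisionError
import Mathlib
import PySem

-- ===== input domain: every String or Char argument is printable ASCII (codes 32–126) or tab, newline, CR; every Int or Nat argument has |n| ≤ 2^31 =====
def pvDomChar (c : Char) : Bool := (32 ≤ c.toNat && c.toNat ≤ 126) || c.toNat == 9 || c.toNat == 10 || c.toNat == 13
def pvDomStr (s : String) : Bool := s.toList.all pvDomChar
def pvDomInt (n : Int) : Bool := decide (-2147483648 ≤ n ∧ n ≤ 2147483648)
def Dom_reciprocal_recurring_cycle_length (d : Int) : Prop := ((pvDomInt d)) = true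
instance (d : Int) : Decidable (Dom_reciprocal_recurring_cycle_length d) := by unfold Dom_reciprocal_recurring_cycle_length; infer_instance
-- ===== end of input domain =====

-- B replaces A's growing remainder list (with its per-iteration membership scan and
-- backward counting pass) by Floyd's tortoise-and-hare cycle detection in O(1) memory.

-- ===== PORT A =====
-- one step of the remainder iteration: (r % d) * 10
def pvF (d r : Int) : Int := PySem.Int.mod r d * 10

-- the while loop; the fuel guard only makes the recursion total (the Python loop has no bound)
def pvALoop (d : Int) : Nat → List Int → Int → (List Int × Int)
  | fuel, lst, r =>
    if r ∈ lst.dropLast then (lst, r)   -- `remainder in remainder_list[:-1]` (dropLast = lst[:-1])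
    else match fuel with
      | 0 => (lst, r)
      | n+1 => pvALoop d n (lst ++ [pvF d r]) (pvF d r)

-- the backward for-loop: `for i in range(len(lst)-2, -1, -1)` visits lst[:-1] reversed
def pvBackCount : List Int → Int → Int
  | [], _ => 0
  | a :: m, r => if a = r then 1 else pvBackCount m r + 1

def reciprocal_recurring_cycle_length (d : Int) : Int :=
  let p := pvALoop d 1099511627776 [1] 1
  pvBackCount p.1.dropLast.reverse p.2

-- ===== PORT B =====
-- `while tortoise != hare: tortoise = f(tortoise); hare = f(f(hare))`; fuel for totality only
def pvMeetLoop (d : Int) : Nat → Int → Int → Int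
  | fuel, t, h =>
    if t = h then t
    else match fuel with
      | 0 => t
      | n+1 => pvMeetLoop d n (pvF d t) (pvF d (pvF d h))

-- `length = 1; hare = f(tortoise); while hare != tortoise: hare = f(hare); length += 1`
def pvPeriodLoop (d tort : Int) : Nat → Int → Int → Int
  | fuel, h, len =>
    if h = tort then len
    else match fuel with
      | 0 => len
      | n+1 => pvPeriodLoop d tort n (pvF d h) (len + 1)

def reciprocal_recurring_cycle_length_alt (d : Int) : Int :=
  let t0 := pvF d 1
  let h0 := pvF d t0
  let tort := pvMeetLoop d 18446744073709551616 t0 h0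
  pvPeriodLoop d tort 18446744073709551616 (pvF d tort) 1

-- ===== PRECONDITION & SPEC =====
-- excludes d = 0 only: there the first modulo step raises ZeroDivisionError in A and in B alike
def Pre_reciprocal_recurring_cycle_length (d : Int) : Prop := d ≠ 0
instance (d : Int) : Decidable (Pre_reciprocal_recurring_cycle_length d) := by unfold Pre_reciprocal_recurring_cycle_length; infer_instance
def pvWitness_reciprocal_recurring_cycle_length : Int := 7
def Spec_reciprocal_recurring_cycle_length (d : Int) (out : Int) : Prop := out = reciprocal_recurring_cycle_length_alt d
instance (d : Int) (out : Int) : Decidable (Spec_reciprocal_recurring_cycle_length d out) := by unfold Spec_reciprocal_recurring_cycle_length; infer_instance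

-- ===== CLAIM (what is proved, stated in full; the proofs are below) =====
def Claim_equal_reciprocal_recurring_cycle_length : Prop := ∀ (d : Int), Dom_reciprocal_recurring_cycle_length d → Pre_reciprocal_recurring_cycle_length d → Spec_reciprocal_recurring_cycle_length d (reciprocal_recurring_cycle_length d)

-- ===== LEMMAS AND PROOFS =====

-- the remainder sequence 1, f(1), f(f(1)), …
def pvSeq (d : Int) : Nat → Int
  | 0 => 1
  | n+1 => pvF d (pvSeq d n)

theorem pvSeq_shift (d : Int) (a b : Nat) (h : pvSeq d a = pvSeq d b) :
    ∀ k, pvSeq d (a + k) = pvSeq d (b + k) := by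
  intro k
  induction k with
  | zero => simpa using h
  | succ k ih => exact congrArg (pvF d) ih

theorem pvSeq_per (d : Int) (n0 i0 : Nat) (h1 : i0 < n0) (h2 : pvSeq d i0 = pvSeq d n0) :
    ∀ m, i0 ≤ m → pvSeq d (m + (n0 - i0)) = pvSeq d m := by
  intro m hm
  have e : m + (n0 - i0) = n0 + (m - i0) := by omega
  rw [e, pvSeq_shift d n0 i0 h2.symm (m - i0)]
  congr 1
  omega

theorem pvSeq_per_mul (d : Int) (n0 i0 : Nat) (h1 : i0 < n0) (h2 : pvSeq d i0 = pvSeq d n0) :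
    ∀ k m, i0 ≤ m → pvSeq d (m + k * (n0 - i0)) = pvSeq d m := by
  intro k
  induction k with
  | zero => intro m _; simp
  | succ k ih =>
    intro m hm
    have e : m + (k + 1) * (n0 - i0) = (m + k * (n0 - i0)) + (n0 - i0) := by ring
    rw [e, pvSeq_per d n0 i0 h1 h2 _ (by omega), ih m hm]

theorem pvSeq_mod (d : Int) (n0 i0 : Nat) (h1 : i0 < n0) (h2 : pvSeq d i0 = pvSeq d n0) :
    ∀ m, i0 ≤ m → pvSeq d m = pvSeq d (i0 + (m - i0) % (n0 - i0)) := by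
  intro m hm
  have hdm := Nat.div_add_mod (m - i0) (n0 - i0)
  rw [Nat.mul_comm] at hdm
  have := pvSeq_per_mul d n0 i0 h1 h2 ((m - i0) / (n0 - i0))
    (i0 + (m - i0) % (n0 - i0)) (by omega)
  rw [← this]
  congr 1
  omega

theorem pvSeq_min (d : Int) (n0 i0 : Nat) (h1 : i0 < n0) (h2 : pvSeq d i0 = pvSeq d n0)
    (h3 : ∀ a b, a < b → b < n0 → pvSeq d a ≠ pvSeq d b) :
    ∀ m k, i0 ≤ m → 1 ≤ k → k < n0 - i0 → pvSeq d (m + k) ≠ pvSeq d m := by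
  intro m k hm hk1 hk2 heq
  have ha := pvSeq_mod d n0 i0 h1 h2 m hm
  have hb := pvSeq_mod d n0 i0 h1 h2 (m + k) (by omega)
  set lam := n0 - i0 with hlamdef
  have hlam : 0 < lam := by omega
  have haa : (m - i0) % lam < lam := Nat.mod_lt _ hlam
  have hbb : (m + k - i0) % lam < lam := Nat.mod_lt _ hlam
  have hvals : pvSeq d (i0 + (m + k - i0) % lam) = pvSeq d (i0 + (m - i0) % lam) := by
    rw [← ha, ← hb, heq]
  have hidx : (m + k - i0) % lam = (m - i0) % lam := by
    by_contra hne
    rcases Nat.lt_or_ge ((m + k - i0) % lam) ((m - i0) % lam) with hlt | hge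
    · exact h3 _ _ (by omega) (by omega) hvals
    · exact h3 _ _ (by omega) (by omega) hvals.symm
  have he : m + k - i0 = (m - i0) + k := by omega
  rw [he] at hidx
  have hmodeq : Nat.ModEq lam (m - i0) ((m - i0) + k) := hidx.symm
  have hdvd : lam ∣ k := by
    have := (Nat.modEq_iff_dvd' (by omega : m - i0 ≤ (m - i0) + k)).mp hmodeq
    simpa using this
  have := Nat.le_of_dvd (by omega) hdvd
  omega

-- ---- A-side list machinery ----

-- index of the first occurrence of v in l
def pvPos? : List Int → Int → Option Nat
  | [], _ => none
  | a :: l, v => if a = v then some 0 else (pvPos? l v).map (· + 1)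

theorem pvPos?_eq_none_iff (l : List Int) (v : Int) : pvPos? l v = none ↔ v ∉ l := by
  induction l with
  | nil => simp [pvPos?]
  | cons a l ih =>
    simp only [pvPos?, List.mem_cons]
    by_cases h : a = v
    · simp [h]
    · have h' : ¬ v = a := fun hh => h hh.symm
      simp [h, h', ih]

theorem pvPos?_lt (l : List Int) (v : Int) (j : Nat) (h : pvPos? l v = some j) : j < l.length := by
  induction l generalizing j with
  | nil => simp [pvPos?] at h
  | cons a l ih =>
    simp only [pvPos?] at h
    by_cases hav : a = v
    · rw [if_pos hav] at h
      cases h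
      simp
    · rw [if_neg hav, Option.map_eq_some_iff] at h
      obtain ⟨j', hj', rfl⟩ := h
      have := ih j' hj'
      simp
      omega

theorem pvPos?_snoc (l : List Int) (a v : Int) :
    pvPos? (l ++ [a]) v =
      match pvPos? l v with
      | some j => some j
      | none => if v = a then some l.length else none := by
  induction l with
  | nil => simp [pvPos?, eq_comm]
  | cons b l ih =>
    simp only [List.cons_append, pvPos?, ih]
    by_cases hbv : b = v
    · simp [hbv]
    · simp only [hbv, if_false]
      cases h : pvPos? l v with
      | some j => simp
      | none => by_cases hva : v = a <;> simp [hva]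

theorem pvBackCount_eq (m : List Int) (v : Int) :
    pvBackCount m v =
      match pvPos? m v with
      | some i => (i : Int) + 1
      | none => (m.length : Int) := by
  induction m with
  | nil => simp [pvBackCount, pvPos?]
  | cons a m ih =>
    simp only [pvBackCount, pvPos?]
    by_cases h : a = v
    · simp [h]
    · rw [if_neg h, if_neg h, ih]
      cases hp : pvPos? m v with
      | some i => simp
      | none => simp

theorem pvPos?_reverse (l : List Int) (v : Int) (j : Nat) (hnd : l.Nodup)
    (h : pvPos? l v = some j) : pvPos? l.reverse v = some (l.length - 1 - j) := by
  induction l generalizing j with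
  | nil => simp [pvPos?] at h
  | cons a l ih =>
    have hnd' : l.Nodup := (List.nodup_cons.mp hnd).2
    have hna : a ∉ l := (List.nodup_cons.mp hnd).1
    simp only [List.reverse_cons]
    by_cases hav : a = v
    · rw [hav] at hna
      simp only [pvPos?, if_pos hav] at h
      have hvr : pvPos? l.reverse v = none := by
        rw [pvPos?_eq_none_iff]; simpa using hna
      rw [pvPos?_snoc, hvr]
      simp only [Option.some.injEq] at h
      simp [← h, hav.symm]
    · simp only [pvPos?, if_neg hav, Option.map_eq_some_iff] at h
      obtain ⟨j', hj', rfl⟩ := h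
      have hlt := pvPos?_lt l v j' hj'
      rw [pvPos?_snoc, ih j' hnd' hj']
      simp only [List.length_cons]
      congr 1
      omega

theorem pvPos?_first (l : List Int) (v : Int) (i : Nat) (hi : i < l.length)
    (hv : l[i] = v) (hfst : ∀ j (hj : j < i), l[j]'(by omega) ≠ v) :
    pvPos? l v = some i := by
  induction l generalizing i with
  | nil => simp at hi
  | cons a l ih =>
    cases i with
    | zero =>
      simp at hv
      simp [pvPos?, hv]
    | succ i =>
      have ha : a ≠ v := by
        have := hfst 0 (by omega)
        simpa using this
      simp only [pvPos?, if_neg ha]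
      rw [ih i (by simpa using hi) (by simpa using hv)
        (fun j hj => by have := hfst (j+1) (by omega); simpa using this)]
      rfl

-- list prefix split: range (m+1) mapped = range m mapped ++ [seq m]
theorem pvMapSplit (d : Int) (m : Nat) :
    (List.range (m+1)).map (pvSeq d) = (List.range m).map (pvSeq d) ++ [pvSeq d m] := by
  rw [List.range_succ, List.map_append]
  rfl

theorem pvSeq_mem_range_iff (d : Int) (n : Nat) (v : Int) :
    v ∈ (List.range n).map (pvSeq d) ↔ ∃ j, j < n ∧ pvSeq d j = v := by
  simp [List.mem_map]

theorem pvALoop_run (d : Int) (n0 i0 : Nat) (h1 : i0 < n0) (h2 : pvSeq d i0 = pvSeq d n0)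
    (h3 : ∀ a b, a < b → b < n0 → pvSeq d a ≠ pvSeq d b) :
    ∀ fuel n, n ≤ n0 → n0 ≤ n + fuel →
      pvALoop d fuel ((List.range (n+1)).map (pvSeq d)) (pvSeq d n)
        = ((List.range (n0+1)).map (pvSeq d), pvSeq d n0) := by
  intro fuel
  induction fuel with
  | zero =>
    intro n hn1 hn2
    obtain rfl : n = n0 := by omega
    rw [pvALoop]
    split <;> rfl
  | succ t ih =>
    intro n hn1 hn2
    by_cases hn : n = n0
    · have hmem : pvSeq d n ∈ ((List.range (n+1)).map (pvSeq d)).dropLast := by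
        rw [pvMapSplit, List.dropLast_concat, pvSeq_mem_range_iff]
        exact ⟨i0, by omega, by rw [hn]; exact h2⟩
      rw [pvALoop, if_pos hmem, hn]
    · have hlt : n < n0 := by omega
      have hmem : pvSeq d n ∉ ((List.range (n+1)).map (pvSeq d)).dropLast := by
        rw [pvMapSplit, List.dropLast_concat, pvSeq_mem_range_iff]
        rintro ⟨j, hj, hje⟩
        exact h3 j n hj hlt hje
      rw [pvALoop, if_neg hmem]
      have harg : (List.range (n+1)).map (pvSeq d) ++ [pvF d (pvSeq d n)]
          = (List.range (n+1+1)).map (pvSeq d) := by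
        rw [pvMapSplit d (n+1)]
        rfl
      show pvALoop d t ((List.range (n+1)).map (pvSeq d) ++ [pvF d (pvSeq d n)]) (pvF d (pvSeq d n))
          = _
      rw [harg]
      exact ih (n+1) (by omega) (by omega)

theorem pvNodup_range_map (d : Int) (n0 : Nat)
    (h3 : ∀ a b, a < b → b < n0 → pvSeq d a ≠ pvSeq d b) :
    ((List.range n0).map (pvSeq d)).Nodup := by
  rw [List.nodup_iff_getElem?_ne_getElem?]
  intro a b hab hb
  simp only [List.length_map, List.length_range] at hb
  simp only [List.getElem?_map, List.getElem?_range (by omega : a < n0),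
    List.getElem?_range hb]
  simp only [Option.map_some]
  intro h
  exact h3 a b hab hb (by injection h)

theorem pvA_val (d : Int) (n0 i0 : Nat) (h1 : i0 < n0) (h2 : pvSeq d i0 = pvSeq d n0)
    (h3 : ∀ a b, a < b → b < n0 → pvSeq d a ≠ pvSeq d b)
    (hb : n0 ≤ 1099511627776) :
    reciprocal_recurring_cycle_length d = ((n0 - i0 : Nat) : Int) := by
  unfold reciprocal_recurring_cycle_length
  have hinit : ([1] : List Int) = (List.range (0+1)).map (pvSeq d) := by
    simp [pvSeq]
  have hrun := pvALoop_run d n0 i0 h1 h2 h3 1099511627776 0 (by omega) (by omega)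
  rw [hinit, show (1 : Int) = pvSeq d 0 from rfl, hrun, pvMapSplit]
  show pvBackCount ((List.map (pvSeq d) (List.range n0) ++ [pvSeq d n0]).dropLast.reverse)
      (pvSeq d n0) = ((n0 - i0 : Nat) : Int)
  rw [List.dropLast_concat, pvBackCount_eq]
  have hfirst : pvPos? ((List.range n0).map (pvSeq d)) (pvSeq d n0) = some i0 := by
    refine pvPos?_first _ _ i0 (by simpa using h1) ?_ ?_
    · simp only [List.getElem_map, List.getElem_range]
      exact h2
    · intro j hj
      simp only [List.getElem_map, List.getElem_range]
      intro hje
      exact h3 j i0 hj h1 (hje.trans h2.symm)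
  have hrev := pvPos?_reverse _ _ _ (pvNodup_range_map d n0 h3) hfirst
  rw [hrev]
  show ((((List.range n0).map (pvSeq d)).length - 1 - i0 : Nat) : Int) + 1
      = ((n0 - i0 : Nat) : Int)
  simp only [List.length_map, List.length_range]
  omega

-- ---- B-side lemmas ----

theorem pvMeetLoop_run (d : Int) :
    ∀ fuel t, 1 ≤ t →
      (∃ u, t ≤ u ∧ u ≤ t + fuel ∧ pvSeq d u = pvSeq d (2*u)) →
      ∃ u, 1 ≤ u ∧ pvSeq d u = pvSeq d (2*u) ∧
        pvMeetLoop d fuel (pvSeq d t) (pvSeq d (2*t)) = pvSeq d u := by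
  intro fuel
  induction fuel with
  | zero =>
    intro t ht h
    obtain ⟨u, _hu1, hu2, hu3⟩ := h
    obtain rfl : u = t := by omega
    exact ⟨u, ht, hu3, by rw [pvMeetLoop, if_pos hu3]⟩
  | succ f ih =>
    intro t ht h
    obtain ⟨u, hu1, hu2, hu3⟩ := h
    by_cases heq : pvSeq d t = pvSeq d (2*t)
    · exact ⟨t, ht, heq, by rw [pvMeetLoop, if_pos heq]⟩
    · have hut : u ≠ t := fun h' => heq (h' ▸ hu3)
      have e2 : pvF d (pvF d (pvSeq d (2*t))) = pvSeq d (2*(t+1)) := by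
        rw [show 2*(t+1) = (2*t+1)+1 from by omega]
        rfl
      obtain ⟨w, hw1, hw2, hw3⟩ := ih (t+1) (by omega) ⟨u, by omega, by omega, hu3⟩
      refine ⟨w, hw1, hw2, ?_⟩
      rw [pvMeetLoop, if_neg heq]
      show pvMeetLoop d f (pvF d (pvSeq d t)) (pvF d (pvF d (pvSeq d (2*t)))) = _
      rw [show pvF d (pvSeq d t) = pvSeq d (t+1) from rfl, e2]
      exact hw3

theorem pvCycleOfMeet (d : Int) (u : Nat) (_hu : 1 ≤ u)
    (hmeet : pvSeq d u = pvSeq d (2*u)) :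
    ∀ k, pvSeq d ((k+1)*u) = pvSeq d u := by
  intro k
  induction k with
  | zero => simp
  | succ k ih =>
    have e : (k+2)*u = (k+1)*u + u := by ring
    have e2 : u + u = 2*u := by ring
    calc pvSeq d ((k+1+1)*u) = pvSeq d ((k+1)*u + u) := by rw [show (k+1+1)*u = (k+1)*u + u from by ring]
      _ = pvSeq d (u + u) := pvSeq_shift d _ u ih u
      _ = pvSeq d u := by rw [e2, ← hmeet]

theorem pvPeriodLoop_run (d : Int) (n0 i0 : Nat) (h1 : i0 < n0) (h2 : pvSeq d i0 = pvSeq d n0)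
    (h3 : ∀ a b, a < b → b < n0 → pvSeq d a ≠ pvSeq d b)
    (m : Nat) (hm : i0 ≤ m) :
    ∀ fuel j, 1 ≤ j → j ≤ n0 - i0 → n0 - i0 ≤ j + fuel →
      pvPeriodLoop d (pvSeq d m) fuel (pvSeq d (m+j)) (j : Int) = ((n0 - i0 : Nat) : Int) := by
  intro fuel
  induction fuel with
  | zero =>
    intro j hj1 hj2 hj3
    obtain rfl : j = n0 - i0 := by omega
    have heq : pvSeq d (m + (n0 - i0)) = pvSeq d m := pvSeq_per d n0 i0 h1 h2 m hm
    rw [pvPeriodLoop, if_pos heq]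
  | succ f ih =>
    intro j hj1 hj2 hj3
    by_cases heq : pvSeq d (m+j) = pvSeq d m
    · have hjeq : j = n0 - i0 := by
        by_contra hne
        exact pvSeq_min d n0 i0 h1 h2 h3 m j hm hj1 (by omega) heq
      rw [pvPeriodLoop, if_pos heq, hjeq]
    · have hjlt : j < n0 - i0 := by
        rcases Nat.lt_or_ge j (n0 - i0) with h | h
        · exact h
        · exfalso
          obtain rfl : j = n0 - i0 := by omega
          exact heq (pvSeq_per d n0 i0 h1 h2 m hm)
      rw [pvPeriodLoop, if_neg heq]
      have e1 : pvF d (pvSeq d (m+j)) = pvSeq d (m+(j+1)) := by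
        rw [show m+(j+1) = (m+j)+1 from by omega]
        rfl
      have e2 : ((j : Int) + 1) = ((j+1 : Nat) : Int) := by push_cast; ring
      show pvPeriodLoop d (pvSeq d m) f (pvF d (pvSeq d (m+j))) ((j : Int) + 1) = _
      rw [e1, e2]
      exact ih (j+1) (by omega) (by omega) (by omega)

theorem pvB_val (d : Int) (n0 i0 : Nat) (h1 : i0 < n0) (h2 : pvSeq d i0 = pvSeq d n0)
    (h3 : ∀ a b, a < b → b < n0 → pvSeq d a ≠ pvSeq d b)
    (hb : n0 ≤ 2147483649) :
    reciprocal_recurring_cycle_length_alt d = ((n0 - i0 : Nat) : Int) := by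
  have hae : i0 + 1 ≤ (n0 - i0) * (i0 + 1) := by
    have := Nat.mul_le_mul_right (k := i0 + 1) (show 1 ≤ n0 - i0 by omega)
    omega
  have humeet : pvSeq d ((n0 - i0) * (i0 + 1)) = pvSeq d (2 * ((n0 - i0) * (i0 + 1))) := by
    have e : 2 * ((n0 - i0) * (i0 + 1)) = (n0 - i0) * (i0 + 1) + (i0 + 1) * (n0 - i0) := by ring
    rw [e]
    exact (pvSeq_per_mul d n0 i0 h1 h2 (i0+1) _ (by omega)).symm
  have hubound : (n0 - i0) * (i0 + 1) ≤ 1 + 18446744073709551616 := by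
    calc (n0 - i0) * (i0 + 1) ≤ 2147483649 * 2147483649 :=
          Nat.mul_le_mul (by omega) (by omega)
      _ ≤ 1 + 18446744073709551616 := by norm_num
  obtain ⟨u, hu1, humt, hrun⟩ := pvMeetLoop_run d 18446744073709551616 1 (le_refl 1)
    ⟨(n0 - i0) * (i0 + 1), by omega, by omega, humeet⟩
  simp only [reciprocal_recurring_cycle_length_alt]
  rw [show pvF d (pvF d 1) = pvSeq d (2*1) from rfl,
      show pvF d 1 = pvSeq d 1 from rfl, hrun]
  have hcm : pvSeq d ((i0+1)*u) = pvSeq d u := pvCycleOfMeet d u hu1 humt i0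
  have hmge : i0 ≤ (i0+1)*u := by
    have := Nat.mul_le_mul_left (i0+1) hu1
    omega
  rw [← hcm]
  rw [show pvF d (pvSeq d ((i0+1)*u)) = pvSeq d ((i0+1)*u + 1) from rfl,
      show (1 : Int) = ((1 : Nat) : Int) from rfl]
  exact pvPeriodLoop_run d n0 i0 h1 h2 h3 ((i0+1)*u) hmge 18446744073709551616 1
    (by omega) (by omega) (by omega)

-- ---- pigeonhole: a repeat exists within |d| + 1 steps ----

theorem pvMod_mem (d : Int) (hd : d ≠ 0) (x : Int) :
    PySem.Int.mod x d ∈ (if 0 < d then Finset.Ico 0 d else Finset.Ico (d+1) 1) := by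
  by_cases h : 0 < d
  · rw [if_pos h, Finset.mem_Ico]
    exact ⟨PySem.Int.mod_nonneg x h, PySem.Int.mod_lt x h⟩
  · rw [if_neg h, Finset.mem_Ico]
    have hneg : d < 0 := by omega
    have := PySem.Int.mod_neg_bounds x hneg
    omega

theorem pvRepeat_exists (d : Int) (hd : d ≠ 0) :
    ∃ n, (∃ j, j < n ∧ pvSeq d j = pvSeq d n) ∧ n ≤ d.natAbs + 1 := by
  set S := (if 0 < d then Finset.Ico 0 d else Finset.Ico (d+1) 1) with hS
  have hcard : S.card = d.natAbs := by
    by_cases h : 0 < d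
    · rw [hS, if_pos h, Int.card_Ico]
      omega
    · rw [hS, if_neg h, Int.card_Ico]
      omega
  have hmaps : ∀ j ∈ Finset.range (d.natAbs + 1), PySem.Int.mod (pvSeq d j) d ∈ S :=
    fun j _ => pvMod_mem d hd (pvSeq d j)
  have hlt : S.card < (Finset.range (d.natAbs + 1)).card := by
    rw [hcard, Finset.card_range]
    omega
  obtain ⟨a, ha, b, hbmem, hab, habeq⟩ :=
    Finset.exists_ne_map_eq_of_card_lt_of_maps_to hlt hmaps
  simp only [Finset.mem_range] at ha hbmem
  have key : ∀ x y : Nat, x < y → y < d.natAbs + 1 →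
      PySem.Int.mod (pvSeq d x) d = PySem.Int.mod (pvSeq d y) d →
      ∃ n, (∃ j, j < n ∧ pvSeq d j = pvSeq d n) ∧ n ≤ d.natAbs + 1 := by
    intro x y hxy hy hmod
    refine ⟨y + 1, ⟨x + 1, by omega, ?_⟩, by omega⟩
    show pvF d (pvSeq d x) = pvF d (pvSeq d y)
    unfold pvF
    rw [hmod]
  rcases Nat.lt_or_ge a b with h | h
  · exact key a b h hbmem habeq
  · exact key b a (by omega) ha habeq.symm

-- ===== VERDICT (by name: the statement is the Claim_ definition above) =====
theorem reciprocal_recurring_cycle_length_spec : Claim_equal_reciprocal_recurring_cycle_length := by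
  intro d hdom hpre
  unfold Spec_reciprocal_recurring_cycle_length
  have hdle : d.natAbs ≤ 2147483648 := by
    unfold Dom_reciprocal_recurring_cycle_length pvDomInt at hdom
    simp only [decide_eq_true_eq] at hdom
    omega
  classical
  obtain ⟨nb, hnb, hnble⟩ := pvRepeat_exists d hpre
  have hex : ∃ n, ∃ j, j < n ∧ pvSeq d j = pvSeq d n := ⟨nb, hnb⟩
  set n0 := Nat.find hex with hn0def
  obtain ⟨i0, hi0lt, hi0eq⟩ := Nat.find_spec hex
  have hmin : ∀ m, m < n0 → ¬ ∃ j, j < m ∧ pvSeq d j = pvSeq d m := fun m hm =>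
    Nat.find_min hex hm
  have h3 : ∀ a b, a < b → b < n0 → pvSeq d a ≠ pvSeq d b := by
    intro a b hab hb habeq
    exact hmin b hb ⟨a, hab, habeq⟩
  have hn0b : n0 ≤ d.natAbs + 1 := le_trans (Nat.find_min' hex hnb) hnble
  rw [pvA_val d n0 i0 hi0lt hi0eq h3 (by omega),
      pvB_val d n0 i0 hi0lt hi0eq h3 (by omega)]
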